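-- pv_equiv track=rewrite | github.com/jantov/Jose_Olpo_IA_1 | 1er_Parcial_JoseOlpo/1P_E3_JoseOlpo.py | fitness_2
-- ===== SOURCE A (Python) =====
-- def fitness_2(ind):
--     punt = 0
--     for i in range(len(ind)):
--         if ind[i] == 0:
--             if (i + 1) % 6 != 1 and ind[i - 1] == 1:
--                 punt += 1
--             if (i + 1) % 6 != 0 and ind[i + 1] == 1:
--                 punt += 1
--             if i + 6 < len(ind) and ind[i + 6] == 1:
--                 punt += 1
--             if i - 6 >= 0 and ind[i - 6] == 1:
--                 punt +=1
--         else: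
--             if (i + 1) % 6 != 1 and ind[i - 1] == 0:
--                 punt += 1
--             if (i + 1) % 6 != 0 and ind[i + 1] == 0:
--                 punt += 1
--             if i + 6 < len(ind) and ind[i + 6] == 0:
--                 punt += 1
--             if i - 6 >= 0 and ind[i - 6] == 0:
--                 punt += 1
--     return punt
-- ===== SOURCE B (Python) =====
-- def _diff(x, y):
--     # 1 if cell x "disagrees" with neighbor y:
--     # a zero cell counts neighbors equal to 1, a nonzero cell counts neighbors equal to 0.
--     if x == 0:
--         return 1 if y == 1 else 0
--     return 1 if y == 0 else 0
--
--
-- def _edge(x, y):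
--     # contribution of one undirected adjacency, counted from both endpoints
--     return _diff(x, y) + _diff(y, x)
--
--
-- def fitness_2(ind):
--     n = len(ind)
--     total = 0
--     for i in range(n):              # horizontal edges within a row of width 6
--         if (i + 1) % 6 != 0:
--             total += _edge(ind[i], ind[i + 1])
--     for i in range(n - 6):          # vertical edges between consecutive rows
--         total += _edge(ind[i], ind[i + 6])
--     return total
-- ===== Notes on version B (the rewrite author's own statement) =====
-- stated objective: alternative
-- what changed: A loops over every cell and tests its four neighbours (left/right/up/down) with modular guards; B loops once over the undirected edges of the width-6 grid (horizontal pairs and vertical pairs) and adds, per edge, the disagreement seen from each endpoint.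
import Mathlib
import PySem

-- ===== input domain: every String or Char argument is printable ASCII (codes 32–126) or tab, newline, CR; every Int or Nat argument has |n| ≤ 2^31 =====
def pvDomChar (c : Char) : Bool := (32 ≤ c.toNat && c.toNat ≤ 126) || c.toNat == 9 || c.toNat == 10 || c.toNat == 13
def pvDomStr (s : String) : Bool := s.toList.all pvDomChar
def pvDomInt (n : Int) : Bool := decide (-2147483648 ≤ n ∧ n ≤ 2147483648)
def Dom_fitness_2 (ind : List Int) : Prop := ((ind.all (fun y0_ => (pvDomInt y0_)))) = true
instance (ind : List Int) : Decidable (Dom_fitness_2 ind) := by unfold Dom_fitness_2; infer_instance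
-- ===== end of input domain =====

-- B replaces A's per-cell scan of four neighbours by a single pass over the grid's
-- undirected edges (horizontal and vertical pairs), adding each edge's disagreement
-- as seen from both endpoints (objective: alternative decomposition, same O(n) cost).


-- ===== PORT A =====
-- loop body of A; pyGetD is exact wherever the index is in range — under Pre_ every
-- access A makes is in range (ind[i+1] is the out-of-range access, where A raises)
def pvStepA (ind : List Int) (punt : Int) (i : Int) : Int :=
  if PySem.List.pyGetD ind i 0 = 0 then
    let punt := if PySem.Int.mod (i + 1) 6 ≠ 1 ∧ PySem.List.pyGetD ind (i - 1) 0 = 1 then punt + 1 else punt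
    let punt := if PySem.Int.mod (i + 1) 6 ≠ 0 ∧ PySem.List.pyGetD ind (i + 1) 0 = 1 then punt + 1 else punt
    let punt := if i + 6 < (ind.length : Int) ∧ PySem.List.pyGetD ind (i + 6) 0 = 1 then punt + 1 else punt
    if i - 6 ≥ 0 ∧ PySem.List.pyGetD ind (i - 6) 0 = 1 then punt + 1 else punt
  else
    let punt := if PySem.Int.mod (i + 1) 6 ≠ 1 ∧ PySem.List.pyGetD ind (i - 1) 0 = 0 then punt + 1 else punt
    let punt := if PySem.Int.mod (i + 1) 6 ≠ 0 ∧ PySem.List.pyGetD ind (i + 1) 0 = 0 then punt + 1 else punt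
    let punt := if i + 6 < (ind.length : Int) ∧ PySem.List.pyGetD ind (i + 6) 0 = 0 then punt + 1 else punt
    if i - 6 ≥ 0 ∧ PySem.List.pyGetD ind (i - 6) 0 = 0 then punt + 1 else punt

def fitness_2 (ind : List Int) : Int :=
  (PySem.List.pyRange 0 (ind.length : Int) 1).foldl (pvStepA ind) 0

-- ===== PORT B =====
def pvDiff (x y : Int) : Int :=
  if x = 0 then (if y = 1 then 1 else 0) else (if y = 0 then 1 else 0)

def pvEdge (x y : Int) : Int := pvDiff x y + pvDiff y x

def pvStepH (ind : List Int) (total : Int) (i : Int) : Int :=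
  if PySem.Int.mod (i + 1) 6 ≠ 0 then
    total + pvEdge (PySem.List.pyGetD ind i 0) (PySem.List.pyGetD ind (i + 1) 0)
  else total

def pvStepV (ind : List Int) (total : Int) (i : Int) : Int :=
  total + pvEdge (PySem.List.pyGetD ind i 0) (PySem.List.pyGetD ind (i + 6) 0)

-- pyGetD is exact wherever the index is in range — under Pre_ every access B makes
-- is in range (ind[i+1] is the out-of-range access, where B raises, exactly as A)
def fitness_2_alt (ind : List Int) : Int :=
  let n : Int := ind.length
  let total := (PySem.List.pyRange 0 n 1).foldl (pvStepH ind) 0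
  (PySem.List.pyRange 0 (n - 6) 1).foldl (pvStepV ind) total

-- ===== PRECONDITION & SPEC =====
-- Pre_ excludes exactly the inputs where A (and B) raise IndexError: when len(ind) is
-- not a multiple of 6 the unguarded ind[i+1] at the last index is out of range.
def Pre_fitness_2 (ind : List Int) : Prop := ind.length % 6 = 0
instance (ind : List Int) : Decidable (Pre_fitness_2 ind) := by unfold Pre_fitness_2; infer_instance

def pvWitness_fitness_2 : List Int := [0, 1, 2, 1, 0, 1]

def Spec_fitness_2 (ind : List Int) (out : Int) : Prop := out = fitness_2_alt ind
instance (ind : List Int) (out : Int) : Decidable (Spec_fitness_2 ind out) := by unfold Spec_fitness_2; infer_instance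

-- ===== CLAIM (what is proved, stated in full; the proofs are below) =====
def Claim_equal_fitness_2 : Prop := ∀ (ind : List Int), Dom_fitness_2 ind → Pre_fitness_2 ind → Spec_fitness_2 ind (fitness_2 ind)

-- ===== LEMMAS AND PROOFS =====

-- cell access with Nat index (ind[k] with default 0; in range under the guards used)
def pvA (ind : List Int) (k : Nat) : Int := ind.getD k 0

-- per-cell contribution of A's loop body, Nat-indexed
def gA (ind : List Int) (k : Nat) : Int :=
  (if (k + 1) % 6 ≠ 1 then pvDiff (pvA ind k) (pvA ind (k - 1)) else 0)
  + (if (k + 1) % 6 ≠ 0 then pvDiff (pvA ind k) (pvA ind (k + 1)) else 0)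
  + (if k + 6 < ind.length then pvDiff (pvA ind k) (pvA ind (k + 6)) else 0)
  + (if 6 ≤ k then pvDiff (pvA ind k) (pvA ind (k - 6)) else 0)

def gH (ind : List Int) (k : Nat) : Int :=
  if (k + 1) % 6 ≠ 0 then pvEdge (pvA ind k) (pvA ind (k + 1)) else 0

def gV (ind : List Int) (k : Nat) : Int :=
  pvEdge (pvA ind k) (pvA ind (k + 6))

lemma ite_and_split (g v : Prop) [Decidable g] [Decidable v] (p : Int) :
    (if g ∧ v then p + 1 else p) = p + (if g then (if v then 1 else 0) else 0) := by
  by_cases hg : g <;> by_cases hv : v <;> simp [hg, hv]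

lemma stepA_eq (ind : List Int) (punt : Int) (k : Nat) :
    pvStepA ind punt (k : Int) = punt + gA ind k := by
  rw [pvStepA, gA]
  simp only [PySem.Int.mod_eq_emod_of_pos (by norm_num : (0:Int) < 6),
    show ((k : Int) + 1) = ((k + 1 : Nat) : Int) by push_cast; ring,
    show ((k : Int) + 6) = ((k + 6 : Nat) : Int) by push_cast; ring,
    PySem.List.pyGetD_natCast,
    show (((k + 1 : Nat) : Int) % 6 ≠ 1 ↔ (k + 1) % 6 ≠ 1) by omega,
    show (((k + 1 : Nat) : Int) % 6 ≠ 0 ↔ (k + 1) % 6 ≠ 0) by omega,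
    show (((k + 6 : Nat) : Int) < (ind.length : Int) ↔ k + 6 < ind.length) by omega,
    show ((k : Int) - 6 ≥ 0 ↔ 6 ≤ k) by omega]
  by_cases h1 : (k + 1) % 6 = 1
  · by_cases h4 : 6 ≤ k
    · simp only [show (k : Int) - 6 = ((k - 6 : Nat) : Int) by omega, PySem.List.pyGetD_natCast,
        h1, ite_and_split, pvA]
      by_cases hx : ind[k]?.getD 0 = 0 <;> simp [hx, pvDiff] <;> split_ifs <;> ring
    · simp only [h1, ite_and_split, pvA]
      by_cases hx : ind[k]?.getD 0 = 0 <;> simp [hx, h4, pvDiff] <;> split_ifs <;> ring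
  · have hk1 : (k : Int) - 1 = ((k - 1 : Nat) : Int) := by omega
    by_cases h4 : 6 ≤ k
    · simp only [hk1, show (k : Int) - 6 = ((k - 6 : Nat) : Int) by omega,
        PySem.List.pyGetD_natCast, ite_and_split, pvA]
      by_cases hx : ind[k]?.getD 0 = 0 <;> simp [hx, h1, pvDiff] <;> split_ifs <;> ring
    · simp only [hk1, PySem.List.pyGetD_natCast, ite_and_split, pvA]
      by_cases hx : ind[k]?.getD 0 = 0 <;> simp [hx, h1, h4, pvDiff] <;> split_ifs <;> ring

lemma stepH_eq (ind : List Int) (total : Int) (k : Nat) :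
    pvStepH ind total (k : Int) = total + gH ind k := by
  rw [pvStepH, gH, PySem.Int.mod_eq_emod_of_pos (by norm_num : (0:Int) < 6),
    show ((k : Int) + 1) = ((k + 1 : Nat) : Int) by push_cast; ring]
  by_cases h : (k + 1) % 6 = 0
  · rw [if_neg (by omega), if_neg (by omega)]; ring
  · rw [if_pos (by omega), if_pos (by omega), PySem.List.pyGetD_natCast,
      PySem.List.pyGetD_natCast]; rfl

lemma stepV_eq (ind : List Int) (total : Int) (k : Nat) :
    pvStepV ind total (k : Int) = total + gV ind k := by
  rw [pvStepV, gV, show ((k : Int) + 6) = ((k + 6 : Nat) : Int) by push_cast; ring,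
    PySem.List.pyGetD_natCast, PySem.List.pyGetD_natCast]
  rfl

lemma foldl_pyRange_sum (f : Int → Int → Int) (g : Nat → Int)
    (h : ∀ (c : Int) (k : Nat), f c (k : Int) = c + g k) :
    ∀ (m : Nat) (c : Int),
      (PySem.List.pyRange 0 (m : Int) 1).foldl f c = c + ∑ k ∈ Finset.range m, g k := by
  intro m
  induction m with
  | zero => intro c; simp [PySem.List.pyRange_one_eq_nil]
  | succ m ih =>
      intro c
      rw [show ((m + 1 : Nat) : Int) = (m : Int) + 1 by push_cast; ring,
        PySem.List.pyRange_one_succ_right (by positivity), List.foldl_append]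
      simp only [List.foldl, Finset.sum_range_succ, ih, h]
      ring

lemma pyRange_sub (len c : Nat) :
    PySem.List.pyRange 0 ((len : Int) - (c : Int)) 1
      = PySem.List.pyRange 0 ((len - c : Nat) : Int) 1 := by
  by_cases h : c ≤ len
  · congr 1; omega
  · rw [PySem.List.pyRange_one_eq_nil (by omega), PySem.List.pyRange_one_eq_nil (by omega)]

lemma sum_shift (c n : Nat) (f : Nat → Int) :
    ∑ k ∈ Finset.range n, (if c ≤ k then f k else 0)
      = ∑ j ∈ Finset.range (n - c), f (j + c) := by
  induction n with
  | zero => simp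
  | succ n ih =>
      rw [Finset.sum_range_succ, ih]
      by_cases h : c ≤ n
      · rw [if_pos h, show n + 1 - c = (n - c) + 1 by omega, Finset.sum_range_succ,
          show n - c + c = n by omega]
      · rw [if_neg h, show n + 1 - c = 0 by omega, show n - c = 0 by omega]
        simp

lemma sum_cut (c n : Nat) (f : Nat → Int) :
    ∑ k ∈ Finset.range n, (if k + c < n then f k else 0)
      = ∑ k ∈ Finset.range (n - c), f k := by
  have h1 : ∀ k ∈ Finset.range n,
      (if k + c < n then f k else 0) = (if k ∈ Finset.range (n - c) then f k else 0) := by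
    intro k hk; simp only [Finset.mem_range] at *; congr 1; simp; omega
  rw [Finset.sum_congr rfl h1, Finset.sum_ite_mem]
  congr 1
  rw [Finset.inter_eq_right]
  intro x hx; simp at *; omega

lemma main_sum (ind : List Int) (hpre : ind.length % 6 = 0) :
    ∑ k ∈ Finset.range ind.length, gA ind k
      = (∑ k ∈ Finset.range ind.length, gH ind k)
        + ∑ k ∈ Finset.range (ind.length - 6), gV ind k := by
  set n := ind.length with hn
  have hsplit : ∑ k ∈ Finset.range n, gA ind k
      = (∑ k ∈ Finset.range n, (if (k + 1) % 6 ≠ 1 then pvDiff (pvA ind k) (pvA ind (k - 1)) else 0))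
        + (∑ k ∈ Finset.range n, (if (k + 1) % 6 ≠ 0 then pvDiff (pvA ind k) (pvA ind (k + 1)) else 0))
        + (∑ k ∈ Finset.range n, (if k + 6 < n then pvDiff (pvA ind k) (pvA ind (k + 6)) else 0))
        + (∑ k ∈ Finset.range n, (if 6 ≤ k then pvDiff (pvA ind k) (pvA ind (k - 6)) else 0)) := by
    simp only [gA, Finset.sum_add_distrib, hn]
  have hH : ∑ k ∈ Finset.range n, gH ind k
      = (∑ k ∈ Finset.range n, (if (k + 1) % 6 ≠ 0 then pvDiff (pvA ind k) (pvA ind (k + 1)) else 0))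
        + (∑ k ∈ Finset.range n, (if (k + 1) % 6 ≠ 0 then pvDiff (pvA ind (k + 1)) (pvA ind k) else 0)) := by
    rw [← Finset.sum_add_distrib]
    exact Finset.sum_congr rfl fun k _ => by rw [gH, pvEdge]; split_ifs <;> simp
  have hV : ∑ k ∈ Finset.range (n - 6), gV ind k
      = (∑ k ∈ Finset.range (n - 6), pvDiff (pvA ind k) (pvA ind (k + 6)))
        + (∑ k ∈ Finset.range (n - 6), pvDiff (pvA ind (k + 6)) (pvA ind k)) := by
    rw [← Finset.sum_add_distrib]
    exact Finset.sum_congr rfl fun k _ => by rw [gV, pvEdge]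
  have E3 : (∑ k ∈ Finset.range n, (if k + 6 < n then pvDiff (pvA ind k) (pvA ind (k + 6)) else 0))
      = ∑ k ∈ Finset.range (n - 6), pvDiff (pvA ind k) (pvA ind (k + 6)) :=
    sum_cut 6 n _
  have E4 : (∑ k ∈ Finset.range n, (if 6 ≤ k then pvDiff (pvA ind k) (pvA ind (k - 6)) else 0))
      = ∑ k ∈ Finset.range (n - 6), pvDiff (pvA ind (k + 6)) (pvA ind k) := by
    rw [sum_shift 6 n _]
    exact Finset.sum_congr rfl fun k _ => by norm_num
  have E1 : (∑ k ∈ Finset.range n, (if (k + 1) % 6 ≠ 1 then pvDiff (pvA ind k) (pvA ind (k - 1)) else 0))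
      = ∑ k ∈ Finset.range n, (if (k + 1) % 6 ≠ 0 then pvDiff (pvA ind (k + 1)) (pvA ind k) else 0) := by
    cases hm : n with
    | zero => simp
    | succ m =>
        rw [Finset.sum_range_succ', Finset.sum_range_succ,
          if_neg (by omega), if_neg (by omega), add_zero, add_zero]
        exact Finset.sum_congr rfl fun k _ => by
          by_cases h : (k + 2) % 6 = 1
          · rw [if_neg (by omega), if_neg (by omega)]
          · rw [if_pos (by omega), if_pos (by omega), Nat.add_sub_cancel]
  rw [hsplit, hH, hV, E1, E3, E4]
  ring

-- ===== VERDICT (by name: the statement is the Claim_ definition above) =====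
theorem fitness_2_spec : Claim_equal_fitness_2 := by
  intro ind _ hpre
  show fitness_2 ind = fitness_2_alt ind
  rw [fitness_2, fitness_2_alt]
  rw [foldl_pyRange_sum (pvStepA ind) (gA ind) (stepA_eq ind) ind.length 0]
  rw [show ((ind.length : Int) - 6) = ((ind.length : Int) - ((6:Nat) : Int)) by norm_cast,
      pyRange_sub,
      foldl_pyRange_sum (pvStepH ind) (gH ind) (stepH_eq ind),
      foldl_pyRange_sum (pvStepV ind) (gV ind) (stepV_eq ind)]
  rw [main_sum ind hpre]
  ring
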